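-- pv_equiv track=rewrite | github.com/pypi-data/pypi-mirror-358 | packages/tumee-codeguard/tumee_codeguard-0.26.1.tar.gz/tumee_codeguard-0.26.1/src/servers/llm_proxy/payload_context.py | _clean_system_artifacts
-- ===== SOURCE A (Python) =====
-- def _clean_system_artifacts(text: str) -> str:
--     """Remove system artifact markers from text."""
--     # Remove common system prompt artifacts
--     artifacts_to_remove = [
--         "# SYSTEM PROMPT INJECTED",
--         "<!-- URGENT NOTES -->",
--         "<!-- END URGENT NOTES -->",
--         "[PRIORITY",
--         "(expires",
--     ]
--
--     cleaned = text
--     for artifact in artifacts_to_remove: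
--         # Remove lines containing artifacts
--         lines = cleaned.split("\n")
--         cleaned_lines = [line for line in lines if artifact not in line]
--         cleaned = "\n".join(cleaned_lines)
--
--     return cleaned.strip()
-- ===== SOURCE B (Python) =====
-- def _clean_system_artifacts(text: str) -> str:
--     """Remove system artifact markers from text."""
--     artifacts_to_remove = [
--         "# SYSTEM PROMPT INJECTED",
--         "<!-- URGENT NOTES -->",
--         "<!-- END URGENT NOTES -->",
--         "[PRIORITY",
--         "(expires",
--     ]
--     kept = [
--         line
--         for line in text.split("\n")
--         if all(artifact not in line for artifact in artifacts_to_remove)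
--     ]
--     return "\n".join(kept).strip()
-- ===== Notes on version B (the rewrite author's own statement) =====
-- stated objective: simpler
-- what changed: A re-splits, re-filters and re-joins the whole text once per artifact (five split/join passes); B splits the text once and keeps each line only if it contains none of the five artifacts, joining and stripping once.
import Mathlib
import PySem

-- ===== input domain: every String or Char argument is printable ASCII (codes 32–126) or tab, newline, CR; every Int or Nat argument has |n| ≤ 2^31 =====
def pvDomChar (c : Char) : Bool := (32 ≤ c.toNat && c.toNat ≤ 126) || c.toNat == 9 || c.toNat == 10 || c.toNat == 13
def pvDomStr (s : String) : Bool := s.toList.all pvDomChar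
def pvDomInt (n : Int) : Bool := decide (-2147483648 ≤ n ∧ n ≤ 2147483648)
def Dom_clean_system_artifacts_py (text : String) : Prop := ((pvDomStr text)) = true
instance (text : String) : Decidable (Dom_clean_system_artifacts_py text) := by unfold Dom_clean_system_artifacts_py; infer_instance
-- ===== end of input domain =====

-- B replaces A's five sequential split/filter/join passes (one per artifact) with a single
-- split, one filtering pass testing all five artifacts per line, one join and the final strip.


-- ===== PORT A =====
-- the five artifact markers, as code-point lists (Python str)
def pvArtifacts : List (List Char) :=
  [ "# SYSTEM PROMPT INJECTED".toList,
    "<!-- URGENT NOTES -->".toList,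
    "<!-- END URGENT NOTES -->".toList,
    "[PRIORITY".toList,
    "(expires".toList ]

-- one iteration of A's loop body: split on "\n", drop lines containing the artifact, re-join
def pvCleanStep (cleaned : List Char) (artifact : List Char) : List Char :=
  PySem.Chars.join ['\n']
    ((PySem.Chars.splitOn cleaned ['\n']).filter (fun line => !(PySem.Chars.isIn artifact line)))

def clean_system_artifacts_py (text : String) : String :=
  String.ofList (PySem.Chars.strip (pvArtifacts.foldl pvCleanStep text.toList))

-- ===== PORT B =====
def clean_system_artifacts_py_alt (text : String) : String :=
  String.ofList (PySem.Chars.strip (PySem.Chars.join ['\n']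
    ((PySem.Chars.splitOn text.toList ['\n']).filter
      (fun line => pvArtifacts.all (fun artifact => !(PySem.Chars.isIn artifact line))))))

-- ===== PRECONDITION & SPEC =====
def Spec_clean_system_artifacts_py (text : String) (out : String) : Prop := out = clean_system_artifacts_py_alt text
instance (text : String) (out : String) : Decidable (Spec_clean_system_artifacts_py text out) := by unfold Spec_clean_system_artifacts_py; infer_instance

-- ===== CLAIM (what is proved, stated in full; the proofs are below) =====
def Claim_equal_clean_system_artifacts_py : Prop := ∀ (text : String), Dom_clean_system_artifacts_py text → Spec_clean_system_artifacts_py text (clean_system_artifacts_py text)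

-- ===== LEMMAS AND PROOFS =====

-- PySem's fueled splitOn, specialised to the single-char separator '\n', is core List.splitOnP
theorem pvModifyHead_eta (l : List (List Char)) : l.modifyHead (fun x => x) = l := by
  cases l <;> rfl

theorem pvGo_spec (fuel : Nat) (l cur : List Char) (acc : List (List Char)) (h : l.length < fuel) :
    PySem.Chars.splitOn.go ['\n'] fuel l cur acc
      = acc.reverse ++ (l.splitOnP (· == '\n')).modifyHead (cur.reverse ++ ·) := by
  induction fuel generalizing l cur acc with
  | zero => omega
  | succ fuel ih =>
    cases l with
    | nil => rw [PySem.Chars.splitOn.go.eq_def]; simp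
    | cons c rest =>
      by_cases hc : c = '\n'
      · subst hc
        rw [PySem.Chars.splitOn.go.eq_def]
        simp only [List.isPrefixOf, beq_self_eq_true, Bool.true_and, if_pos]
        rw [ih _ _ _ (by simpa using Nat.lt_of_succ_lt_succ h)]
        simp only [List.splitOnP_cons, beq_self_eq_true, if_true]
        simp [pvModifyHead_eta]
      · rw [PySem.Chars.splitOn.go.eq_def]
        have hpre : List.isPrefixOf ['\n'] (c :: rest) = false := by
          simp [List.isPrefixOf]; exact fun hh => (hc hh.symm).elim
        simp only [hpre, Bool.false_eq_true, if_false]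
        rw [ih _ _ _ (by simpa using Nat.lt_of_succ_lt_succ h)]
        have hpc : (c == '\n') = false := by simpa using hc
        simp only [List.splitOnP_cons, hpc, Bool.false_eq_true, if_false, List.modifyHead_modifyHead]
        have hfe : (fun x => (c :: cur).reverse ++ x) = ((fun x : List Char => cur.reverse ++ x) ∘ List.cons c) := by
          funext x; simp
        rw [hfe]

theorem pvSplitOn_eq (cs : List Char) :
    PySem.Chars.splitOn cs ['\n'] = cs.splitOn '\n' := by
  rw [PySem.Chars.splitOn, pvGo_spec _ _ _ _ (Nat.lt_succ_self _)]
  simp [List.splitOn, pvModifyHead_eta]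

theorem pvSplitOnP_mem (p : Char → Bool) (xs : List Char) :
    ∀ piece ∈ xs.splitOnP p, ∀ a ∈ piece, ¬ p a := by
  induction xs with
  | nil => simp
  | cons x xs ih =>
    intro piece hp a ha
    rw [List.splitOnP_cons] at hp
    by_cases hx : p x
    · simp only [hx, if_true] at hp
      rcases List.mem_cons.mp hp with h | h
      · subst h; simp at ha
      · exact ih _ h _ ha
    · simp only [hx, Bool.false_eq_true, if_false] at hp
      cases hs : xs.splitOnP p with
      | nil => exact absurd hs (List.splitOnP_ne_nil _ _)
      | cons hd tl =>
        rw [hs, List.modifyHead_cons] at hp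
        rcases List.mem_cons.mp hp with h | h
        · subst h
          rcases List.mem_cons.mp ha with rfl | ha'
          · exact hx
          · exact ih hd (hs ▸ List.mem_cons_self) _ ha'
        · exact ih _ (hs ▸ List.mem_cons_of_mem _ h) _ ha

-- a nonempty artifact is not contained in the empty line
theorem pvIsIn_nil (a : List Char) (ha : a ≠ []) : PySem.Chars.isIn a [] = false := by
  rw [PySem.Chars.isIn_eq_false_iff]
  intro hinf
  exact ha (List.eq_nil_of_infix_nil hinf)

-- the main collapse: A's sequential per-artifact passes equal B's single filtered pass
theorem pvFoldl_eq (arts : List (List Char)) (h : ∀ a ∈ arts, a ≠ [] ∧ '\n' ∉ a)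
    (cs : List Char) :
    arts.foldl pvCleanStep cs
      = PySem.Chars.join ['\n']
          ((PySem.Chars.splitOn cs ['\n']).filter
            (fun line => arts.all (fun artifact => !(PySem.Chars.isIn artifact line)))) := by
  induction arts generalizing cs with
  | nil =>
    simp only [List.foldl_nil, List.all_nil, List.filter_true]
    rw [pvSplitOn_eq, PySem.Chars.join]
    exact (List.intercalate_splitOn cs '\n').symm
  | cons a rest ih =>
    obtain ⟨hane, hanl⟩ := h a List.mem_cons_self
    have hrest : ∀ b ∈ rest, b ≠ [] ∧ '\n' ∉ b := fun b hb => h b (List.mem_cons_of_mem _ hb)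
    rw [List.foldl_cons, ih hrest]
    show PySem.Chars.join ['\n'] ((PySem.Chars.splitOn (pvCleanStep cs a) ['\n']).filter _) = _
    rw [pvCleanStep, pvSplitOn_eq cs]
    set L := cs.splitOn '\n' with hL
    set F := L.filter (fun line => !(PySem.Chars.isIn a line)) with hF
    have hfilter : L.filter (fun line => (a :: rest).all (fun artifact => !(PySem.Chars.isIn artifact line)))
        = F.filter (fun line => rest.all (fun artifact => !(PySem.Chars.isIn artifact line))) := by
      rw [hF, List.filter_filter]
      simp only [List.all_cons]
      exact List.filter_congr (fun x _ => by rw [Bool.and_comm])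
    rw [hfilter]
    cases hFe : F with
    | nil =>
      -- the first pass removed every line: both sides join the empty/[""] list to ""
      have : PySem.Chars.join ['\n'] ([] : List (List Char)) = [] := by
        simp [PySem.Chars.join, List.intercalate]
      rw [this, pvSplitOn_eq, List.splitOn_nil]
      have hkeep : rest.all (fun artifact => !(PySem.Chars.isIn artifact ([] : List Char))) = true := by
        rw [List.all_eq_true]
        intro b hb
        simp [pvIsIn_nil b (hrest b hb).1]
      simp [hkeep, PySem.Chars.join, List.intercalate]
    | cons f0 ftl =>
      -- the first pass kept some lines: splitting its join recovers exactly those lines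
      have hnl : ∀ l ∈ F, '\n' ∉ l := by
        intro l hl
        have hl' : l ∈ L := List.mem_of_mem_filter hl
        intro hmem
        exact pvSplitOnP_mem (· == '\n') cs l hl' '\n' hmem (by simp)
      have hround : PySem.Chars.splitOn (PySem.Chars.join ['\n'] F) ['\n'] = F := by
        rw [pvSplitOn_eq, PySem.Chars.join, List.splitOn]
        exact List.splitOn_intercalate (ls := F) '\n' hnl (by rw [hFe]; exact List.cons_ne_nil _ _)
      rw [← hFe, hround]

-- ===== VERDICT (by name: the statement is the Claim_ definition above) =====
theorem clean_system_artifacts_py_spec : Claim_equal_clean_system_artifacts_py := by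
  intro text _
  show clean_system_artifacts_py text = clean_system_artifacts_py_alt text
  rw [clean_system_artifacts_py, clean_system_artifacts_py_alt,
    pvFoldl_eq pvArtifacts (by decide) text.toList]
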